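-- pv_equiv track=rewrite | github.com/UnalDeniz/university-projects | algorithm-analysis/project-1/DenizUnal.py | Example
-- ===== SOURCE A (Python) =====
-- import math
--
-- def Example(arr):
--     n = len(arr)
--     arr2 = [0,0,0,0,0]
--
--     for i in range(n):
--         if(arr[i] == 0):
--             for t1 in range(i,n):
--                 p1 = t1**(1/2)
--                 x1 = n+1
--                 while(x1 >= 1):
--                     x1 = math.floor(x1 / 2)
--                     arr2[i % 5] = arr2[i % 5] + 1
--         elif(arr[i] == 1):
--             for t2 in range(n,0,-1):
--                 for p2 in range(1,n+1):
--                     x2 = n+1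
--                     while(x2 > 0):
--                         x2 = math.floor(x2/2)
--                         arr2[i%5] = arr2[i%5] + 1
--         elif(arr[i] == 2):
--             for t3 in range(1,n+1):
--                 x3 = t3+1
--                 for p3 in range(t3**2):
--                     arr2[i%5] = arr2[i%5] + 1
--
--     return arr2
-- ===== SOURCE B (Python) =====
-- def Example(arr):
--     # Closed-form per-index contributions instead of running the nested loops.
--     n = len(arr)
--     w = (n + 1).bit_length()          # iterations of each halving while-loop
--     c1 = n * n * w                    # branch arr[i] == 1
--     c2 = n * (n + 1) * (2 * n + 1) // 6   # branch arr[i] == 2: sum of squares 1..n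
--     arr2 = [0, 0, 0, 0, 0]
--     for i, v in enumerate(arr):
--         if v == 0:
--             arr2[i % 5] += (n - i) * w
--         elif v == 1:
--             arr2[i % 5] += c1
--         elif v == 2:
--             arr2[i % 5] += c2
--     return arr2
-- ===== Notes on version B (the rewrite author's own statement) =====
-- stated objective: alternative
-- what changed: Replaces the nested loops (per-index range loops with halving while-loops) by a single pass that adds a closed-form contribution per index: (n-i)*bit_length(n+1) for value 0, n*n*bit_length(n+1) for value 1, and the sum-of-squares formula n(n+1)(2n+1)/6 for value 2.
import Mathlib
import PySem

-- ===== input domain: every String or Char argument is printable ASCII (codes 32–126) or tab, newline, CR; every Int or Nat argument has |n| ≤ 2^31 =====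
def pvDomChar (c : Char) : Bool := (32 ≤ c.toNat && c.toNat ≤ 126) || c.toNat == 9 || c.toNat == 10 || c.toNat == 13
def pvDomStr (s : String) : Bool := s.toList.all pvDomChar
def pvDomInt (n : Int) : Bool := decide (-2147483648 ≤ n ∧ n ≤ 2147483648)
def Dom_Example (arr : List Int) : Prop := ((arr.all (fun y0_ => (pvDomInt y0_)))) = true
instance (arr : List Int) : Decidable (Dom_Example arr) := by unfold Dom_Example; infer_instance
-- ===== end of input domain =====

-- B replaces A's nested loops by one pass adding a closed-form contribution per index
-- (bit-length of n+1 for the halving while-loops, and the sum-of-squares formula).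

-- ===== PORT A =====

-- arr2[i % 5] = arr2[i % 5] + 1  (index i % 5 is always 0..4, in range for the 5-element list)
def pvBump (l : List Int) (k : Nat) : List Int := l.set k (l.getD k 0 + 1)

-- while x1 >= 1: x1 = math.floor(x1 / 2); arr2[k] += 1   (math.floor(x/2) on an int = x // 2)
def pvWhileGE (x : Int) (l : List Int) (k : Nat) : List Int :=
  if 1 ≤ x then pvWhileGE (PySem.Int.floordiv x 2) (pvBump l k) k else l
termination_by x.toNat
decreasing_by
  rw [PySem.Int.floordiv_eq_ediv_of_pos (by omega)]
  omega

-- while x2 > 0: x2 = math.floor(x2 / 2); arr2[k] += 1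
def pvWhileGT (x : Int) (l : List Int) (k : Nat) : List Int :=
  if 0 < x then pvWhileGT (PySem.Int.floordiv x 2) (pvBump l k) k else l
termination_by x.toNat
decreasing_by
  rw [PySem.Int.floordiv_eq_ediv_of_pos (by omega)]
  omega

-- literal transliteration of A (p1 = t1**(1/2) and x3 = t3+1 are computed but never used; omitted)
def Example (arr : List Int) : List Int :=
  let n : Int := arr.length
  (PySem.List.pyRange 0 n 1).foldl (fun arr2 i =>
    if PySem.List.pyGetD arr i 0 = 0 then          -- arr[i]; i ∈ range(n) is always in range
      (PySem.List.pyRange i n 1).foldl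
        (fun l _t1 => pvWhileGE (n + 1) l ((PySem.Int.mod i 5).toNat)) arr2
    else if PySem.List.pyGetD arr i 0 = 1 then
      (PySem.List.pyRange n 0 (-1)).foldl (fun l _t2 =>
        (PySem.List.pyRange 1 (n + 1) 1).foldl
          (fun l2 _p2 => pvWhileGT (n + 1) l2 ((PySem.Int.mod i 5).toNat)) l) arr2
    else if PySem.List.pyGetD arr i 0 = 2 then
      (PySem.List.pyRange 1 (n + 1) 1).foldl (fun l t3 =>
        (PySem.List.pyRange 0 (t3 ^ 2) 1).foldl
          (fun l2 _p3 => pvBump l2 ((PySem.Int.mod i 5).toNat)) l) arr2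
    else arr2) [0, 0, 0, 0, 0]

-- ===== PORT B =====

-- arr2[i % 5] += c
def pvAddAt (l : List Int) (k : Nat) (c : Int) : List Int := l.set k (l.getD k 0 + c)

def Example_alt (arr : List Int) : List Int :=
  let n : Int := arr.length
  let w : Int := PySem.Int.bitLength (n + 1)                 -- (n + 1).bit_length()
  let c1 : Int := n * n * w
  let c2 : Int := PySem.Int.floordiv (n * (n + 1) * (2 * n + 1)) 6
  (PySem.List.enumerate arr).foldl (fun l p =>
    if p.2 = 0 then pvAddAt l ((PySem.Int.mod p.1 5).toNat) ((n - p.1) * w)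
    else if p.2 = 1 then pvAddAt l ((PySem.Int.mod p.1 5).toNat) c1
    else if p.2 = 2 then pvAddAt l ((PySem.Int.mod p.1 5).toNat) c2
    else l) [0, 0, 0, 0, 0]

-- ===== PRECONDITION & SPEC =====
def Spec_Example (arr : List Int) (out : List Int) : Prop := out = Example_alt arr
instance (arr : List Int) (out : List Int) : Decidable (Spec_Example arr out) := by unfold Spec_Example; infer_instance

-- ===== CLAIM (what is proved, stated in full; the proofs are below) =====
def Claim_equal_Example : Prop := ∀ (arr : List Int), Dom_Example arr → Spec_Example arr (Example arr)

-- ===== LEMMAS AND PROOFS =====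

theorem pvAddAt_zero (l : List Int) (k : Nat) (hk : k < l.length) : pvAddAt l k 0 = l := by
  simp only [pvAddAt, add_zero, List.getD_eq_getElem l 0 hk]
  exact List.set_getElem_self hk

theorem pvAddAt_addAt (l : List Int) (k : Nat) (a b : Int) (hk : k < l.length) :
    pvAddAt (pvAddAt l k a) k b = pvAddAt l k (a + b) := by
  simp only [pvAddAt]
  rw [List.getD_eq_getElem l 0 hk, List.getD_eq_getElem _ 0 (by simpa using hk),
    List.getElem_set_self, List.set_set]
  ring_nf

theorem pvBump_eq (l : List Int) (k : Nat) : pvBump l k = pvAddAt l k 1 := rfl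

-- the halving while-loop adds exactly bit_length(x) to bucket k
theorem pvWhileGE_eq (x : Int) (l : List Int) (k : Nat) : 0 ≤ x → k < l.length →
    pvWhileGE x l k = pvAddAt l k (PySem.Int.bitLength x) := by
  fun_induction pvWhileGE x l k with
  | case1 x l h ih =>
    intro hx hk
    have h2 : PySem.Int.floordiv x 2 = x / 2 := PySem.Int.floordiv_eq_ediv_of_pos (by norm_num)
    rw [ih (by omega) (by simpa [pvBump] using hk)]
    show pvAddAt (pvAddAt l k 1) k _ = _
    rw [pvAddAt_addAt _ _ _ _ hk]
    conv_rhs => rw [PySem.Int.bitLength_of_pos (show (0:Int) < x by omega)]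
    push_cast
    ring_nf
  | case2 x l h =>
    intro hx hk
    have : x = 0 := by omega
    subst this
    rw [PySem.Int.bitLength_zero]
    simpa using (pvAddAt_zero l _ hk).symm

theorem pvWhileGT_eq (x : Int) (l : List Int) (k : Nat) : 0 ≤ x → k < l.length →
    pvWhileGT x l k = pvAddAt l k (PySem.Int.bitLength x) := by
  fun_induction pvWhileGT x l k with
  | case1 x l h ih =>
    intro hx hk
    have h2 : PySem.Int.floordiv x 2 = x / 2 := PySem.Int.floordiv_eq_ediv_of_pos (by norm_num)
    rw [ih (by omega) (by simpa [pvBump] using hk)]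
    show pvAddAt (pvAddAt l k 1) k _ = _
    rw [pvAddAt_addAt _ _ _ _ hk]
    conv_rhs => rw [PySem.Int.bitLength_of_pos (show (0:Int) < x by omega)]
    push_cast
    ring_nf
  | case2 x l h =>
    intro hx hk
    have : x = 0 := by omega
    subst this
    rw [PySem.Int.bitLength_zero]
    simpa using (pvAddAt_zero l _ hk).symm

/-- A fold whose step adds `g x` to bucket `k` (length-preservingly) is one add of the sum. -/
theorem foldl_step_addAt {α : Type} (k : Nat) (step : List Int → α → List Int) (g : α → Int)
    (hstep : ∀ (l : List Int) (x : α), k < l.length → step l x = pvAddAt l k (g x)) :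
    ∀ (lst : List α) (l : List Int), k < l.length →
      lst.foldl step l = pvAddAt l k ((lst.map g).sum) := by
  intro lst
  induction lst with
  | nil => intro l hk; simpa using (pvAddAt_zero l _ hk).symm
  | cons a t ih =>
    intro l hk
    have hk' : k < (pvAddAt l k (g a)).length := by simpa [pvAddAt] using hk
    simp only [List.foldl_cons, hstep l a hk, List.map_cons, List.sum_cons]
    rw [ih _ hk', pvAddAt_addAt _ _ _ _ hk]

/-- Two folds agree when their steps agree on states of length 5 and preserve that length. -/
theorem foldl_eq_of_len5 {α : Type} (f g : List Int → α → List Int) :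
    ∀ (lst : List α),
      (∀ (l : List Int) (x : α), l.length = 5 → x ∈ lst → f l x = g l x) →
      (∀ (l : List Int) (x : α), l.length = 5 → x ∈ lst → (g l x).length = 5) →
      ∀ (l : List Int), l.length = 5 → lst.foldl f l = lst.foldl g l := by
  intro lst
  induction lst with
  | nil => intro _ _ l _; rfl
  | cons a t ih =>
    intro hfg hg l hl
    simp only [List.foldl_cons]
    rw [hfg l a hl (by simp)]
    exact ih (fun l x h hm => hfg l x h (by simp [hm])) (fun l x h hm => hg l x h (by simp [hm]))
      _ (hg l a hl (by simp))

theorem sum_squares (m : Nat) :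
    ((PySem.List.pyRange 1 ((m : Int) + 1) 1).map (fun t => t ^ 2)).sum
      = PySem.Int.floordiv ((m : Int) * ((m : Int) + 1) * (2 * (m : Int) + 1)) 6 := by
  have key : ∀ (j : Nat), 6 * ((PySem.List.pyRange 1 ((j : Int) + 1) 1).map (fun t => t ^ 2)).sum
      = (j : Int) * ((j : Int) + 1) * (2 * (j : Int) + 1) := by
    intro j
    induction j with
    | zero => simp [PySem.List.pyRange_one_eq_nil]
    | succ p ih =>
      rw [show ((p + 1 : Nat) : Int) + 1 = ((p : Int) + 1) + 1 by push_cast; ring,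
        PySem.List.pyRange_one_succ_right (by omega)]
      simp only [List.map_append, List.sum_append, List.map_cons, List.map_nil, List.sum_cons,
        List.sum_nil]
      push_cast
      ring_nf
      ring_nf at ih
      linarith
  rw [← key m, PySem.Int.floordiv_eq_ediv_of_pos (by norm_num),
    Int.mul_ediv_cancel_left _ (by norm_num)]

-- ===== VERDICT (by name: the statement is the Claim_ definition above) =====
theorem Example_spec : Claim_equal_Example := by
  intro arr _
  unfold Spec_Example
  show Example arr = Example_alt arr
  simp only [Example, Example_alt]
  rw [PySem.List.enumerate_eq_map_pyRange arr 0, List.foldl_map]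
  simp only [PySem.List.len_eq]
  refine foldl_eq_of_len5 _ _ _ ?_ ?_ _ rfl
  · -- the two per-index steps agree
    intro l i hl hmem
    obtain ⟨hi0, hin⟩ := PySem.List.mem_pyRange_one.mp hmem
    have hk : (PySem.Int.mod i 5).toNat < l.length := by
      have := PySem.Int.mod_nonneg i (show (0:Int) < 5 by norm_num)
      have := PySem.Int.mod_lt i (show (0:Int) < 5 by norm_num)
      omega
    have hn1 : (0:Int) ≤ (arr.length : Int) + 1 := by positivity
    split_ifs with h0 h1 h2
    · -- arr[i] == 0
      rw [foldl_step_addAt ((PySem.Int.mod i 5).toNat) _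
          (fun _ => (PySem.Int.bitLength ((arr.length : Int) + 1) : Int))
          (fun l' _ hk' => pvWhileGE_eq _ l' _ hn1 hk') _ l hk,
        PySem.List.sum_map_const_int, PySem.List.length_pyRange_one]
      congr 1
      have : (((arr.length : Int) - i).toNat : Int) = (arr.length : Int) - i := by omega
      rw [this]
    · -- arr[i] == 1
      rw [foldl_step_addAt ((PySem.Int.mod i 5).toNat) _
          (fun _ => ((((arr.length : Int) + 1 - 1).toNat : Int)
            * (PySem.Int.bitLength ((arr.length : Int) + 1) : Int)))
          (fun l' _ hk' => by
            rw [foldl_step_addAt ((PySem.Int.mod i 5).toNat) _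
                (fun _ => (PySem.Int.bitLength ((arr.length : Int) + 1) : Int))
                (fun l'' _ hk'' => pvWhileGT_eq _ l'' _ hn1 hk'') _ l' hk',
              PySem.List.sum_map_const_int, PySem.List.length_pyRange_one])
          _ l hk,
        PySem.List.sum_map_const_int, PySem.List.length_pyRange_neg_one]
      congr 1
      have e1 : (((arr.length : Int) - 0).toNat : Int) = (arr.length : Int) := by omega
      have e2 : (((arr.length : Int) + 1 - 1).toNat : Int) = (arr.length : Int) := by omega
      rw [e1, e2]
      ring
    · -- arr[i] == 2
      rw [foldl_step_addAt ((PySem.Int.mod i 5).toNat) _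
          (fun t3 => (((t3 ^ 2 - 0).toNat : Int) * 1))
          (fun l' t3 hk' => by
            rw [foldl_step_addAt ((PySem.Int.mod i 5).toNat) _ (fun _ => (1:Int))
                (fun l'' _ hk'' => pvBump_eq l'' _) _ l' hk',
              PySem.List.sum_map_const_int, PySem.List.length_pyRange_one])
          _ l hk]
      congr 1
      rw [List.map_congr_left (g := fun t => t ^ 2) (fun t _ => by
        have h2 : (0:Int) ≤ t ^ 2 := sq_nonneg t
        rw [mul_one, sub_zero, Int.toNat_of_nonneg h2])]
      exact sum_squares arr.length
    · rfl
  · -- B's step preserves length 5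
    intro l p hl _
    split_ifs <;> simp [pvAddAt, hl]
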